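-- pv_equiv track=rewrite | github.com/lmriccardo/redex | redex/redex.py | merge_args
-- ===== SOURCE A (Python) =====
-- from typing import List
--
-- def merge_args(command_args: List[str]) -> List[str]:
--     """ Reorganize the command arguments given along with the command  """
--     outputs, old_string = [], ""
--
--     for element in command_args:
--         # If the element is an assignment command then, it checks if
--         # the string has been initialized or not. If it has been
--         # initialized with a previous element, then insert in the output
--         # list the current content of the string, otherwise just
--         # initialize the string with the contento of the current element.
--         # If the command is not an assignment, then just place the element
--         # in the string for a later use.
--         if "=" in element:
--             if old_string != "":
--                 outputs.append(old_string.strip())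
--
--             old_string = element
--             continue
--
--         old_string += " " + element
--
--     outputs.append(old_string.strip())
--     return outputs
-- ===== SOURCE B (Python) =====
-- from typing import List
--
-- def merge_args(command_args: List[str]) -> List[str]:
--     """Reorganize the command arguments given along with the command."""
--     starts = [0] + [i for i in range(1, len(command_args)) if '=' in command_args[i]]
--     ends = starts[1:] + [len(command_args)]
--     return [' '.join(command_args[s:e]).strip() for s, e in zip(starts, ends)]
-- ===== Notes on version B (the rewrite author's own statement) =====
-- stated objective: simpler
-- what changed: Replaces the stateful string-accumulator loop with manual flush logic by computing segment start indices in one pass and emitting each group as join(slice) in a second pass.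
import Mathlib
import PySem

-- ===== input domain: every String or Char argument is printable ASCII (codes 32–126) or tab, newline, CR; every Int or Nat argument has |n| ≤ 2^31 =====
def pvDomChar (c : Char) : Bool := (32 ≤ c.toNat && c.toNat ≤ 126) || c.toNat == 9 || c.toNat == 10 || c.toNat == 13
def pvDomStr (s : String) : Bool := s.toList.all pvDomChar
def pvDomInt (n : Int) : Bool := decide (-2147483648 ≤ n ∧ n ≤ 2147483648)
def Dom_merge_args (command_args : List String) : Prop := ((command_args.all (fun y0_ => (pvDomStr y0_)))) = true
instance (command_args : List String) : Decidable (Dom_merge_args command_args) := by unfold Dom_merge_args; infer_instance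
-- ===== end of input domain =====

-- B replaces A's stateful string accumulator (with its manual flush logic) by an index-splitting
-- two-pass formulation: same O(n) cost, simpler. Strings are handled on the List Char side
-- throughout, per the PySem convention.

-- ===== PORT A =====
-- the loop body: state = (outputs, old_string)
def mergeStepA (st : List String × List Char) (element : List Char) : List String × List Char :=
  if PySem.Chars.isIn ['='] element then
    ((if st.2 ≠ [] then st.1 ++ [String.ofList (PySem.Chars.strip st.2)] else st.1), element)
  else
    (st.1, st.2 ++ ' ' :: element)   -- old_string += " " + element

def merge_args (command_args : List String) : List String :=
  let r := (command_args.map String.toList).foldl mergeStepA ([], [])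
  r.1 ++ [String.ofList (PySem.Chars.strip r.2)]

-- ===== PORT B =====
def merge_args_alt (command_args : List String) : List String :=
  let xs := command_args.map String.toList
  let n : Int := xs.length
  -- starts = [0] + [i for i in range(1, len(command_args)) if '=' in command_args[i]]
  let starts : List Int :=
    0 :: (PySem.List.pyRange 1 n 1).filter (fun i => PySem.Chars.isIn ['='] (PySem.List.pyGetD xs i []))
  -- ends = starts[1:] + [len(command_args)]
  let ends : List Int := PySem.List.slice starts (some 1) none ++ [n]
  -- [' '.join(command_args[s:e]).strip() for s, e in zip(starts, ends)]
  (starts.zip ends).map (fun se =>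
    String.ofList (PySem.Chars.strip (PySem.Chars.join [' '] (PySem.List.slice xs (some se.1) (some se.2)))))

-- ===== PRECONDITION & SPEC =====
def Spec_merge_args (command_args : List String) (out : List String) : Prop := out = merge_args_alt command_args
instance (command_args : List String) (out : List String) : Decidable (Spec_merge_args command_args out) := by unfold Spec_merge_args; infer_instance

-- ===== CLAIM (what is proved, stated in full; the proofs are below) =====
def Claim_equal_merge_args : Prop := ∀ (command_args : List String), Dom_merge_args command_args → Spec_merge_args command_args (merge_args command_args)

-- ===== LEMMAS AND PROOFS =====

-- the common intermediate object: the token groups, split before every '='-token (split anchored at index 0)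
def renderS (ts : List (List Char)) : String :=
  String.ofList (PySem.Chars.strip (PySem.Chars.join [' '] ts))

def segsGo (cur : List (List Char)) : List (List Char) → List (List (List Char))
  | [] => [cur]
  | e :: t => if PySem.Chars.isIn ['='] e then cur :: segsGo [e] t else segsGo (cur ++ [e]) t

def segs : List (List Char) → List (List (List Char))
  | [] => [[]]
  | e :: t => segsGo [e] t

-- ---------- A-side: the fold equals the segment view ----------
def goA (cur : List Char) : List (List Char) → List String
  | [] => [String.ofList (PySem.Chars.strip cur)]
  | e :: t =>
    if PySem.Chars.isIn ['='] e then String.ofList (PySem.Chars.strip cur) :: goA e t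
    else goA (cur ++ ' ' :: e) t

theorem ne_nil_of_isIn {e : List Char} (h : PySem.Chars.isIn ['='] e = true) : e ≠ [] := by
  intro he; subst he
  rw [PySem.Chars.isIn_iff_infix] at h
  simp at h

theorem foldA_eq_goA (xs : List (List Char)) :
    ∀ (outs : List String) (cur : List Char), cur ≠ [] →
      (xs.foldl mergeStepA (outs, cur)).1
        ++ [String.ofList (PySem.Chars.strip (xs.foldl mergeStepA (outs, cur)).2)]
      = outs ++ goA cur xs := by
  induction xs with
  | nil => intro outs cur h; simp [goA]
  | cons e t ih =>
    intro outs cur h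
    by_cases he : PySem.Chars.isIn ['='] e = true
    · simp only [List.foldl_cons, mergeStepA, he, if_true, if_pos h, goA]
      rw [ih (outs ++ [String.ofList (PySem.Chars.strip cur)]) e (ne_nil_of_isIn he)]
      simp
    · simp only [List.foldl_cons, mergeStepA, he, goA, Bool.false_eq_true, if_false]
      exact ih outs (cur ++ ' ' :: e) (by simp)

theorem strip_sep (sep s : List Char) (h : sep = [] ∨ sep = [' ']) :
    PySem.Chars.strip (sep ++ s) = PySem.Chars.strip s := by
  rcases h with h | h <;> subst h
  · rfl
  · simp [PySem.Chars.strip, PySem.Chars.lstrip, PySem.Chars.isspace]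

theorem join_snoc (ts : List (List Char)) (e : List Char) (h : ts ≠ []) :
    PySem.Chars.join [' '] (ts ++ [e]) = PySem.Chars.join [' '] ts ++ ' ' :: e := by
  induction ts with
  | nil => simp at h
  | cons a t ih =>
    cases t with
    | nil => simp [PySem.Chars.join_cons_cons, PySem.Chars.join_singleton]
    | cons b t' =>
      rw [List.cons_append, PySem.Chars.join_cons_cons, List.cons_append,
        PySem.Chars.join_cons_cons, ← List.cons_append, ih (by simp)]
      simp

theorem goA_eq_segsGo (xs : List (List Char)) :
    ∀ (ts : List (List Char)) (sep : List Char), ts ≠ [] → (sep = [] ∨ sep = [' ']) →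
      goA (sep ++ PySem.Chars.join [' '] ts) xs = (segsGo ts xs).map renderS := by
  induction xs with
  | nil =>
    intro ts sep _ hsep
    simp only [goA, segsGo, List.map, renderS, strip_sep _ _ hsep]
  | cons e t ih =>
    intro ts sep hts hsep
    by_cases he : PySem.Chars.isIn ['='] e = true
    · simp only [goA, segsGo, he, if_true, List.map, renderS, strip_sep _ _ hsep]
      have := ih [e] [] (by simp) (Or.inl rfl)
      rw [PySem.Chars.join_singleton, List.nil_append] at this
      rw [this]
    · simp only [goA, segsGo, he, Bool.false_eq_true, if_false]
      rw [List.append_assoc, ← join_snoc ts e hts]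
      exact ih (ts ++ [e]) sep (by simp) hsep

theorem mergeA_eq_segs (ca : List String) :
    merge_args ca = (segs (ca.map String.toList)).map renderS := by
  unfold merge_args
  cases hxs : ca.map String.toList with
  | nil => simp [segs, renderS, PySem.Chars.join_nil]
  | cons e t =>
    simp only [List.foldl_cons, segs]
    by_cases he : PySem.Chars.isIn ['='] e = true
    · have h1 : mergeStepA ([], []) e = ([], e) := by simp [mergeStepA, he]
      rw [h1, foldA_eq_goA t [] e (ne_nil_of_isIn he), List.nil_append]
      have := goA_eq_segsGo t [e] [] (by simp) (Or.inl rfl)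
      rw [PySem.Chars.join_singleton, List.nil_append] at this
      exact this
    · have h1 : mergeStepA ([], []) e = ([], ' ' :: e) := by simp [mergeStepA, he]
      rw [h1, foldA_eq_goA t [] (' ' :: e) (by simp), List.nil_append]
      have := goA_eq_segsGo t [e] [' '] (by simp) (Or.inr rfl)
      rw [PySem.Chars.join_singleton] at this
      exact this

-- ---------- B-side: the index/zip/slice formulation equals the segment view ----------
-- chop xs e s F = the groups of xs between consecutive cut indices s, F…, e
def chop (xs : List (List Char)) (e : Nat) : Nat → List Nat → List (List (List Char))
  | s, [] => [(xs.drop s).take (e - s)]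
  | s, c :: rest => (xs.drop s).take (c - s) :: chop xs e c rest

def cutsF (xs : List (List Char)) : List Nat :=
  (List.range' 1 (xs.length - 1)).filter (fun i => PySem.Chars.isIn ['='] (xs.getD i []))

def modLast (f : List (List Char) → List (List Char)) : List (List (List Char)) → List (List (List Char))
  | [] => []
  | [a] => [f a]
  | a :: b :: t => a :: modLast f (b :: t)

theorem modLast_cons (f : List (List Char) → List (List Char)) (a : List (List Char))
    (l : List (List (List Char))) (h : l ≠ []) : modLast f (a :: l) = a :: modLast f l := by
  cases l with
  | nil => exact absurd rfl h
  | cons b t => rfl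

theorem chop_ne_nil (xs : List (List Char)) (e s : Nat) (F : List Nat) : chop xs e s F ≠ [] := by
  cases F <;> simp [chop]

theorem chop_stable (xs : List (List Char)) (x : List Char) :
    ∀ (F : List Nat) (s : Nat), (∀ c ∈ F, c ≤ xs.length) → s ≤ xs.length →
      chop (xs ++ [x]) xs.length s F = chop xs xs.length s F := by
  intro F
  induction F with
  | nil =>
    intro s _ hs
    simp only [chop]
    rw [List.drop_append_of_le_length hs,
      List.take_append_of_le_length (by simp only [List.length_drop]; omega)]
  | cons c F ih =>
    intro s hc hs
    have hcle : c ≤ xs.length := hc c (by simp)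
    simp only [chop]
    rw [List.drop_append_of_le_length hs,
      List.take_append_of_le_length (by simp only [List.length_drop]; omega),
      ih c (fun d hd => hc d (by simp [hd])) hcle]

theorem chop_extend (xs : List (List Char)) (x : List Char) :
    ∀ (F : List Nat) (s : Nat), (∀ c ∈ F, c ≤ xs.length) → s ≤ xs.length →
      chop (xs ++ [x]) (xs.length + 1) s F = modLast (· ++ [x]) (chop xs xs.length s F) := by
  intro F
  induction F with
  | nil =>
    intro s _ hs
    simp only [chop, modLast]
    rw [List.drop_append_of_le_length hs,
      List.take_of_length_le (by simp only [List.length_append, List.length_drop,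
        List.length_cons, List.length_nil]; omega),
      List.take_of_length_le (by simp only [List.length_drop]; omega)]
  | cons c F ih =>
    intro s hc hs
    have hcle : c ≤ xs.length := hc c (by simp)
    simp only [chop]
    rw [modLast_cons _ _ _ (chop_ne_nil _ _ _ _),
      List.drop_append_of_le_length hs,
      List.take_append_of_le_length (by simp only [List.length_drop]; omega),
      ih c (fun d hd => hc d (by simp [hd])) hcle]

theorem chop_snoc_cut (xs : List (List Char)) (e c : Nat) :
    ∀ (F : List Nat) (s : Nat),
      chop xs e s (F ++ [c]) = chop xs c s F ++ [(xs.drop c).take (e - c)] := by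
  intro F
  induction F with
  | nil => intro s; simp [chop]
  | cons d F ih => intro s; simp only [chop, List.cons_append, ih]

theorem segsGo_ne_nil (t : List (List Char)) : ∀ cur, segsGo cur t ≠ [] := by
  induction t with
  | nil => intro cur; simp [segsGo]
  | cons e t ih =>
    intro cur
    by_cases he : PySem.Chars.isIn ['='] e = true <;> simp [segsGo, he, ih]

theorem segsGo_snoc_eq (t : List (List Char)) (x : List Char)
    (hx : PySem.Chars.isIn ['='] x = true) :
    ∀ cur, segsGo cur (t ++ [x]) = segsGo cur t ++ [[x]] := by
  induction t with
  | nil => intro cur; simp [segsGo, hx]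
  | cons e t ih =>
    intro cur
    by_cases he : PySem.Chars.isIn ['='] e = true <;> simp [segsGo, he, ih]

theorem segsGo_snoc_ne (t : List (List Char)) (x : List Char)
    (hx : PySem.Chars.isIn ['='] x = false) :
    ∀ cur, segsGo cur (t ++ [x]) = modLast (· ++ [x]) (segsGo cur t) := by
  induction t with
  | nil => intro cur; simp [segsGo, hx, modLast]
  | cons e t ih =>
    intro cur
    by_cases he : PySem.Chars.isIn ['='] e = true
    · simp only [List.cons_append, segsGo, he, if_true, ih]
      rw [modLast_cons _ _ _ (segsGo_ne_nil _ _)]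
    · simp [segsGo, he, ih]

theorem mem_cutsF_le (xs : List (List Char)) (c : Nat) (h : c ∈ cutsF xs) : c ≤ xs.length := by
  unfold cutsF at h
  have := List.mem_range'_1.mp (List.mem_of_mem_filter h)
  omega

theorem cutsF_snoc (xs : List (List Char)) (x : List Char) (h : xs ≠ []) :
    cutsF (xs ++ [x]) =
      cutsF xs ++ (if PySem.Chars.isIn ['='] x then [xs.length] else []) := by
  unfold cutsF
  have hn : xs.length ≠ 0 := by simpa using h
  have h1 : (xs ++ [x]).length - 1 = (xs.length - 1) + 1 := by simp; omega
  rw [h1]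
  rw [show (List.range' 1 ((xs.length - 1) + 1)) =
      List.range' 1 (xs.length - 1) ++ [1 + 1 * (xs.length - 1)] from List.range'_concat]
  rw [List.filter_append]
  congr 1
  · apply List.filter_congr
    intro i hi
    have := List.mem_range'_1.mp hi
    rw [List.getD_append _ _ _ _ (by omega)]
  · have h2 : 1 + 1 * (xs.length - 1) = xs.length := by omega
    rw [h2]
    by_cases hx : PySem.Chars.isIn ['='] x = true
    · simp [hx]
    · simp [hx]

theorem chop_eq_segs (xs : List (List Char)) :
    chop xs xs.length 0 (cutsF xs) = segs xs := by
  induction xs using List.reverseRecOn with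
  | nil => simp [cutsF, chop, segs]
  | append_singleton xs x ih =>
    cases hxs : xs with
    | nil => simp [cutsF, chop, segs, segsGo, List.getD]
    | cons e t =>
      have hne : xs ≠ [] := by simp [hxs]
      rw [← hxs]
      rw [cutsF_snoc xs x hne]
      have hlen : (xs ++ [x]).length = xs.length + 1 := by simp
      by_cases hx : PySem.Chars.isIn ['='] x = true
      · rw [if_pos hx, hlen]
        rw [chop_snoc_cut]
        rw [chop_stable xs x _ 0 (fun c hc => mem_cutsF_le xs c hc) (by omega)]
        rw [ih]
        rw [List.drop_left, List.take_of_length_le (by simp)]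
        rw [hxs]
        simp only [segs]
        exact (segsGo_snoc_eq t x hx [e]).symm
      · rw [if_neg hx, List.append_nil, hlen]
        rw [chop_extend xs x _ 0 (fun c hc => mem_cutsF_le xs c hc) (by omega)]
        rw [ih]
        rw [hxs]
        simp only [segs]
        exact (segsGo_snoc_ne t x (by simpa using hx) [e]).symm

-- ---------- B-side: normalising the Int-level port down to chop ----------
theorem zipmap_chop_int (xs : List (List Char)) (e : Nat) :
    ∀ (F : List Nat) (s : Nat),
      ((((s : Nat) : Int) :: F.map (fun c : Nat => (c : Int))).zip
          (F.map (fun c : Nat => (c : Int)) ++ [((e : Nat) : Int)])).map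
        (fun se => String.ofList (PySem.Chars.strip
          (PySem.Chars.join [' '] (PySem.List.slice xs (some se.1) (some se.2)))))
      = (chop xs e s F).map renderS := by
  intro F
  induction F with
  | nil =>
    intro s
    simp only [List.map_nil, List.nil_append, List.zip_cons_cons, List.zip_nil_right,
      List.map_cons, chop, renderS, PySem.List.slice_natCast]
  | cons c F ih =>
    intro s
    simp only [List.map_cons, List.cons_append, List.zip_cons_cons, chop,
      renderS, PySem.List.slice_natCast, ih c]

theorem filter_cast (xs : List (List Char)) :
    (PySem.List.pyRange 1 (xs.length : Int) 1).filter
        (fun i => PySem.Chars.isIn ['='] (PySem.List.pyGetD xs i []))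
      = (cutsF xs).map (fun c : Nat => (c : Int)) := by
  rw [PySem.List.pyRange_one]
  have h1 : ((xs.length : Int) - 1).toNat = xs.length - 1 := by omega
  rw [h1]
  have h2 : (fun k : Nat => (1 : Int) + (k : Int)) = (fun c : Nat => (c : Int)) ∘ (fun k => 1 + k) := by
    funext k; simp
  rw [h2, ← List.map_map, List.filter_map]
  unfold cutsF
  rw [List.range'_eq_map_range, List.filter_map, List.map_map]
  have h3 : ((fun i : Int => PySem.Chars.isIn ['='] (PySem.List.pyGetD xs i [])) ∘ (fun c : Nat => (c : Int)))
      = (fun c : Nat => PySem.Chars.isIn ['='] (xs.getD c [])) := by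
    funext k
    simp [PySem.List.pyGetD_natCast]
  rw [h3]
  conv_rhs => rw [List.filter_map]
  rw [List.map_map]

theorem mergeB_eq_chop (ca : List String) :
    merge_args_alt ca =
      (chop (ca.map String.toList) (ca.map String.toList).length 0 (cutsF (ca.map String.toList))).map renderS := by
  unfold merge_args_alt
  simp only
  rw [filter_cast (ca.map String.toList), PySem.List.slice_from_one, List.tail_cons]
  have := zipmap_chop_int (ca.map String.toList) (ca.map String.toList).length (cutsF (ca.map String.toList)) 0
  simpa using this

-- ===== VERDICT (by name: the statement is the Claim_ definition above) =====
theorem merge_args_spec : Claim_equal_merge_args := by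
  intro ca _
  unfold Spec_merge_args
  rw [mergeB_eq_chop, chop_eq_segs, mergeA_eq_segs]
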